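-- pv_equiv track=rewrite | github.com/grewalsk/Knights-Tour | app.py | initial_degrees
-- ===== SOURCE A (Python) =====
-- KNIGHT_MOVES = [
--     (-2, -1), (-2, 1), (-1, -2), (-1, 2),
--     (1, -2), (1, 2), (2, -1), (2, 1)
-- ]
--
-- def initial_degrees(m, n):
--     """
--     Calculates the initial degree for each square on an m x n board.
--     The degree is the number of possible knight moves from that square,
--     assuming all other squares are unvisited.
--     """
--     degree_board = [[0 for _ in range(n)] for _ in range(m)]
--     for r_idx in range(m):
--         for c_idx in range(n):
--             count = 0
--             for dr, dc in KNIGHT_MOVES: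
--                 nr, nc = r_idx + dr, c_idx + dc
--                 if 0 <= nr < m and 0 <= nc < n:
--                     count += 1
--             degree_board[r_idx][c_idx] = count
--     return degree_board
-- ===== SOURCE B (Python) =====
-- def initial_degrees(m, n):
--     """
--     Calculates the initial degree for each square on an m x n board
--     via a closed-form separable count: a knight move combines a +-1
--     offset on one axis with a +-2 offset on the other, so the degree
--     factors as axis(r,1,m)*axis(c,2,n) + axis(r,2,m)*axis(c,1,n).
--     """
--     def axis(x, d, size):
--         # number of valid offsets -d, +d from position x on an axis of length `size`
--         return (x >= d) + (x + d < size)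
--     return [[axis(r, 1, m) * axis(c, 2, n) + axis(r, 2, m) * axis(c, 1, n)
--              for c in range(n)] for r in range(m)]
-- ===== Notes on version B (the rewrite author's own statement) =====
-- stated objective: simpler
-- what changed: replaces the inner scan over the 8 KNIGHT_MOVES offsets with a closed-form separable count per cell (valid +-1 row offsets times valid +-2 column offsets, plus the symmetric product)
import Mathlib
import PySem

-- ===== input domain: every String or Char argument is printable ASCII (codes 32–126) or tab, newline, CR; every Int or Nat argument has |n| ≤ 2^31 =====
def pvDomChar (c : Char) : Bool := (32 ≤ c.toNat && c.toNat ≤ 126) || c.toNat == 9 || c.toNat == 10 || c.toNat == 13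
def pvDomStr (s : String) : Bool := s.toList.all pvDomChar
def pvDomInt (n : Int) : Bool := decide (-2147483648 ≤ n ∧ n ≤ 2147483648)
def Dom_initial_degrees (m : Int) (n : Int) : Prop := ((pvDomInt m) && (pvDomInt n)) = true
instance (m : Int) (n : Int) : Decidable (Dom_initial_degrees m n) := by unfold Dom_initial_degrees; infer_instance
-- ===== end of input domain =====

-- B replaces A's per-cell scan over the 8 KNIGHT_MOVES by a closed-form separable
-- count per cell (valid ±1 row offsets × valid ±2 column offsets, plus the symmetric
-- product); objective: simpler.

-- ===== PORT A =====
def KNIGHT_MOVES : List (Int × Int) :=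
  [(-2, -1), (-2, 1), (-1, -2), (-1, 2), (1, -2), (1, 2), (2, -1), (2, 1)]

-- Python fills a zero board cell by cell in row-major order; rendered as the
-- same row-major traversal building each cell's count in place.
def initial_degrees (m : Int) (n : Int) : List (List Int) :=
  (PySem.List.pyRange 0 m 1).map (fun r_idx =>
    (PySem.List.pyRange 0 n 1).map (fun c_idx =>
      KNIGHT_MOVES.foldl (fun count mv =>
        if 0 ≤ r_idx + mv.1 ∧ r_idx + mv.1 < m ∧ 0 ≤ c_idx + mv.2 ∧ c_idx + mv.2 < n
        then count + 1 else count) 0))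

-- ===== PORT B =====
-- number of valid offsets −d, +d from position x on an axis of length `size`
def pvAxis (x : Int) (d : Int) (size : Int) : Int :=
  (if d ≤ x then 1 else 0) + (if x + d < size then 1 else 0)

def initial_degrees_alt (m : Int) (n : Int) : List (List Int) :=
  (PySem.List.pyRange 0 m 1).map (fun r =>
    (PySem.List.pyRange 0 n 1).map (fun c =>
      pvAxis r 1 m * pvAxis c 2 n + pvAxis r 2 m * pvAxis c 1 n))

-- ===== PRECONDITION & SPEC =====
def Spec_initial_degrees (m : Int) (n : Int) (out : List (List Int)) : Prop := out = initial_degrees_alt m n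
instance (m : Int) (n : Int) (out : List (List Int)) : Decidable (Spec_initial_degrees m n out) := by unfold Spec_initial_degrees; infer_instance

-- ===== CLAIM (what is proved, stated in full; the proofs are below) =====
def Claim_equal_initial_degrees : Prop := ∀ (m : Int) (n : Int), Dom_initial_degrees m n → Spec_initial_degrees m n (initial_degrees m n)

-- ===== LEMMAS AND PROOFS =====

def pvI (p : Prop) [Decidable p] : Int := if p then 1 else 0

theorem pvI_step (p : Prop) [Decidable p] (a : Int) :
    (if p then a + 1 else a) = a + pvI p := by
  unfold pvI; split <;> ring

theorem pvI_mul (p q : Prop) [Decidable p] [Decidable q] :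
    pvI p * pvI q = pvI (p ∧ q) := by
  unfold pvI; by_cases hp : p <;> by_cases hq : q <;> simp [hp, hq]

theorem pvI_congr (p q : Prop) [Decidable p] [Decidable q] (h : p ↔ q) :
    pvI p = pvI q := by
  unfold pvI; by_cases hp : p
  · rw [if_pos hp, if_pos (h.mp hp)]
  · rw [if_neg hp, if_neg (fun hq => hp (h.mpr hq))]

theorem pvAxis_eq (x d size : Int) :
    pvAxis x d size = pvI (d ≤ x) + pvI (x + d < size) := by
  unfold pvAxis pvI; rfl

theorem cell_eq (m n r c : Int) (hr0 : 0 ≤ r) (hrm : r < m) (hc0 : 0 ≤ c) (hcn : c < n) :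
    KNIGHT_MOVES.foldl (fun count mv =>
        if 0 ≤ r + mv.1 ∧ r + mv.1 < m ∧ 0 ≤ c + mv.2 ∧ c + mv.2 < n
        then count + 1 else count) 0
      = pvAxis r 1 m * pvAxis c 2 n + pvAxis r 2 m * pvAxis c 1 n := by
  simp only [KNIGHT_MOVES, List.foldl, pvI_step, pvAxis_eq]
  have h1 : pvI (0 ≤ r + (-2) ∧ r + (-2) < m ∧ 0 ≤ c + (-1) ∧ c + (-1) < n)
      = pvI (2 ≤ r) * pvI (1 ≤ c) := by rw [pvI_mul]; exact pvI_congr _ _ (by omega)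
  have h2 : pvI (0 ≤ r + (-2) ∧ r + (-2) < m ∧ 0 ≤ c + 1 ∧ c + 1 < n)
      = pvI (2 ≤ r) * pvI (c + 1 < n) := by rw [pvI_mul]; exact pvI_congr _ _ (by omega)
  have h3 : pvI (0 ≤ r + (-1) ∧ r + (-1) < m ∧ 0 ≤ c + (-2) ∧ c + (-2) < n)
      = pvI (1 ≤ r) * pvI (2 ≤ c) := by rw [pvI_mul]; exact pvI_congr _ _ (by omega)
  have h4 : pvI (0 ≤ r + (-1) ∧ r + (-1) < m ∧ 0 ≤ c + 2 ∧ c + 2 < n)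
      = pvI (1 ≤ r) * pvI (c + 2 < n) := by rw [pvI_mul]; exact pvI_congr _ _ (by omega)
  have h5 : pvI (0 ≤ r + 1 ∧ r + 1 < m ∧ 0 ≤ c + (-2) ∧ c + (-2) < n)
      = pvI (r + 1 < m) * pvI (2 ≤ c) := by rw [pvI_mul]; exact pvI_congr _ _ (by omega)
  have h6 : pvI (0 ≤ r + 1 ∧ r + 1 < m ∧ 0 ≤ c + 2 ∧ c + 2 < n)
      = pvI (r + 1 < m) * pvI (c + 2 < n) := by rw [pvI_mul]; exact pvI_congr _ _ (by omega)
  have h7 : pvI (0 ≤ r + 2 ∧ r + 2 < m ∧ 0 ≤ c + (-1) ∧ c + (-1) < n)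
      = pvI (r + 2 < m) * pvI (1 ≤ c) := by rw [pvI_mul]; exact pvI_congr _ _ (by omega)
  have h8 : pvI (0 ≤ r + 2 ∧ r + 2 < m ∧ 0 ≤ c + 1 ∧ c + 1 < n)
      = pvI (r + 2 < m) * pvI (c + 1 < n) := by rw [pvI_mul]; exact pvI_congr _ _ (by omega)
  rw [h1, h2, h3, h4, h5, h6, h7, h8]; ring

-- ===== VERDICT (by name: the statement is the Claim_ definition above) =====
theorem initial_degrees_spec : Claim_equal_initial_degrees := by
  intro m n _
  unfold Spec_initial_degrees initial_degrees initial_degrees_alt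
  refine List.map_congr_left (fun r hr => ?_)
  rw [PySem.List.mem_pyRange_one] at hr
  refine List.map_congr_left (fun c hc => ?_)
  rw [PySem.List.mem_pyRange_one] at hc
  exact cell_eq m n r c hr.1 hr.2 hc.1 hc.2
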